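-- pv_equiv track=rewrite | github.com/omshivarjun27/major-2 | core/speech/tts_handler.py | format_scene_description
-- ===== SOURCE A (Python) =====
-- from typing import Any, Callable, Dict, List, Optional, Tuple
--
-- def format_scene_description(scene: Dict) -> str:
--     """Format scene description for TTS."""
--     objects = scene.get("objects", [])
--
--     if not objects:
--         return "I don't detect any significant objects in view."
--
--     # Group by type
--     people = [o for o in objects if o.get("class") == "person"]
--     obstacles = [o for o in objects if o.get("is_obstacle")]
--     others = [o for o in objects if not o.get("is_obstacle") and o.get("class") != "person"]
--
--     parts = []
--
--     if people:
--         if len(people) == 1: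
--             parts.append("One person")
--         else:
--             parts.append(f"{len(people)} people")
--
--     if obstacles:
--         if len(obstacles) == 1:
--             parts.append("one obstacle ahead")
--         else:
--             parts.append(f"{len(obstacles)} obstacles in the area")
--
--     if others:
--         names = list(set(o.get("class", "object") for o in others[:3]))
--         parts.append(", ".join(names))
--
--     return "I see: " + ", ".join(parts) + "."
-- ===== SOURCE B (Python) =====
-- def format_scene_description(scene):
--     """Format scene description for TTS (single-pass classification with counters)."""
--     objects = scene.get("objects", [])
--
--     if not objects:
--         return "I don't detect any significant objects in view."
--
--     n_people = 0
--     n_obstacles = 0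
--     n_others = 0
--     names = []
--     for o in objects:
--         person = o.get("class") == "person"
--         obstacle = bool(o.get("is_obstacle"))
--         if person:
--             n_people += 1
--         if obstacle:
--             n_obstacles += 1
--         if not person and not obstacle:
--             if n_others < 3:
--                 name = o.get("class", "object")
--                 if name not in names:
--                     names.append(name)
--             n_others += 1
--
--     parts = []
--     if n_people == 1:
--         parts.append("One person")
--     elif n_people:
--         parts.append("%d people" % n_people)
--     if n_obstacles == 1:
--         parts.append("one obstacle ahead")
--     elif n_obstacles:
--         parts.append("%d obstacles in the area" % n_obstacles)
--     if n_others: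
--         parts.append(", ".join(sorted(names)))
--
--     return "I see: " + ", ".join(parts) + "."
-- ===== Notes on version B (the rewrite author's own statement) =====
-- stated objective: alternative
-- what changed: B replaces A's three full filtering passes plus a list(set(...)) of the others' class names by a single pass over the objects maintaining three counters and an order-preserving deduplicated name list (capped at the first three others), emitted in sorted order instead of set iteration order.
import Mathlib
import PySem

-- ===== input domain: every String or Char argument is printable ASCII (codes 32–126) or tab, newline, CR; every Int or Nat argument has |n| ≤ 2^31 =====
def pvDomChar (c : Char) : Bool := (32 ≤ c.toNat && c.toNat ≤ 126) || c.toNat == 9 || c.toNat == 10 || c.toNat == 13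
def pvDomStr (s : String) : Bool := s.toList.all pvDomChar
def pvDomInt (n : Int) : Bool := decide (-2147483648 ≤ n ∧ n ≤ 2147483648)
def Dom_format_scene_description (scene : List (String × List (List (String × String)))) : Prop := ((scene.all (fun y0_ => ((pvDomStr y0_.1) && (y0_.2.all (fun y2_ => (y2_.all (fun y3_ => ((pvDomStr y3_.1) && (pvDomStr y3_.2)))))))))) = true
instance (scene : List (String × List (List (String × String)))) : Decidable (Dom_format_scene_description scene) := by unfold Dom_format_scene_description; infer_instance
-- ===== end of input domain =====

-- B reads the scene in a single pass with three counters and an order-preserving capped name list,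
-- instead of A's three filtering passes plus a set() over the others' class names (objective: alternative).

-- shared primitive: Python dict .get on an association list (first match), used by BOTH Pythons as o.get(k)
def pvGet? {α : Type} (d : List (String × α)) (k : String) : Option α :=
  match d with
  | [] => none
  | (a, v) :: t => if a = k then some v else pvGet? t k

-- shared primitive: Python truthiness of o.get(k) for a str-valued dict (None/'' falsy, other strings truthy)
def pvTruthy (v : Option String) : Bool :=
  match v with
  | none => false
  | some s => !(s == "")

-- ===== PORT A =====
def format_scene_description (scene : List (String × List (List (String × String)))) : String :=
  let objects := (pvGet? scene "objects").getD []
  if objects = [] then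
    "I don't detect any significant objects in view."
  else
    let people := objects.filter (fun o => pvGet? o "class" == some "person")
    let obstacles := objects.filter (fun o => pvTruthy (pvGet? o "is_obstacle"))
    let others := objects.filter (fun o => !pvTruthy (pvGet? o "is_obstacle") && !(pvGet? o "class" == some "person"))
    let parts : List String := []
    let parts := if people = [] then parts else
      parts ++ [if people.length = 1 then "One person" else PySem.Int.toStr (people.length : Int) ++ " people"]
    let parts := if obstacles = [] then parts else
      parts ++ [if obstacles.length = 1 then "one obstacle ahead" else PySem.Int.toStr (obstacles.length : Int) ++ " obstacles in the area"]
    let parts := if others = [] then parts else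
      -- list(set(...)) : PySem.Set keeps first-insertion order; exact under Pre_ (at most one distinct name)
      let names := PySem.Set.ofList ((PySem.List.slice others none (some 3)).map (fun o => (pvGet? o "class").getD "object"))
      parts ++ [PySem.Str.join ", " names]
    "I see: " ++ PySem.Str.join ", " parts ++ "."

-- ===== PORT B =====
-- loop body of Source B: state = (n_people, n_obstacles, n_others, names)
def pvStepB (st : Nat × Nat × Nat × List String) (o : List (String × String)) : Nat × Nat × Nat × List String :=
  let person := pvGet? o "class" == some "person"
  let obstacle := pvTruthy (pvGet? o "is_obstacle")
  let nP := if person then st.1 + 1 else st.1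
  let nO := if obstacle then st.2.1 + 1 else st.2.1
  if !person && !obstacle then
    (nP, nO, st.2.2.1 + 1,
      -- 'if name not in names: names.append(name)' is exactly PySem.Set.add
      if st.2.2.1 < 3 then PySem.Set.add st.2.2.2 ((pvGet? o "class").getD "object") else st.2.2.2)
  else
    (nP, nO, st.2.2.1, st.2.2.2)

def format_scene_description_alt (scene : List (String × List (List (String × String)))) : String :=
  let objects := (pvGet? scene "objects").getD []
  if objects = [] then
    "I don't detect any significant objects in view."
  else
    let st := objects.foldl pvStepB (0, 0, 0, [])
    let parts : List String := []
    let parts := if st.1 = 1 then parts ++ ["One person"]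
      else if st.1 ≠ 0 then parts ++ [PySem.Int.toStr (st.1 : Int) ++ " people"] else parts
    let parts := if st.2.1 = 1 then parts ++ ["one obstacle ahead"]
      else if st.2.1 ≠ 0 then parts ++ [PySem.Int.toStr (st.2.1 : Int) ++ " obstacles in the area"] else parts
    let parts := if st.2.2.1 ≠ 0 then parts ++ [PySem.Str.join ", " (PySem.List.sorted st.2.2.2 (fun x => x) false)] else parts
    "I see: " ++ PySem.Str.join ", " parts ++ "."

-- ===== PRECONDITION & SPEC =====
-- Pre_ excludes scenes whose first three non-person non-obstacle objects carry two or more distinct class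
-- names: there A joins a Python set() of those names into the output, so A's output order depends on the
-- interpreter's hash seed and no single value can be matched or proved.
def Pre_format_scene_description (scene : List (String × List (List (String × String)))) : Prop :=
  let objects := (List.lookup "objects" scene).getD []
  let others := objects.filter
    (fun o => ((List.lookup "is_obstacle" o).getD "" == "") && !(List.lookup "class" o == some "person"))
  (PySem.List.dedup ((others.take 3).map (fun o => (List.lookup "class" o).getD "object"))).length ≤ 1

instance (scene : List (String × List (List (String × String)))) : Decidable (Pre_format_scene_description scene) := by
  unfold Pre_format_scene_description; infer_instance

def pvWitness_format_scene_description : (List (String × List (List (String × String)))) :=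
  [("objects", [[("class", "person")], [("class", "cat")], [("is_obstacle", "1")], [("class", "cat")]])]

def Spec_format_scene_description (scene : List (String × List (List (String × String)))) (out : String) : Prop := out = format_scene_description_alt scene
instance (scene : List (String × List (List (String × String)))) (out : String) : Decidable (Spec_format_scene_description scene out) := by unfold Spec_format_scene_description; infer_instance

-- ===== CLAIM (what is proved, stated in full; the proofs are below) =====
def Claim_equal_format_scene_description : Prop := ∀ (scene : List (String × List (List (String × String)))), Dom_format_scene_description scene → Pre_format_scene_description scene → Spec_format_scene_description scene (format_scene_description scene)

-- ===== LEMMAS AND PROOFS =====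

-- B's single-pass fold computes exactly A's three filter lengths and the deduplicated
-- class names of the first three "others"
theorem pvFoldB (xs : List (List (String × String))) :
    xs.foldl pvStepB (0, 0, 0, ([] : List String)) =
      ((xs.filter fun o => pvGet? o "class" == some "person").length,
       (xs.filter fun o => pvTruthy (pvGet? o "is_obstacle")).length,
       (xs.filter fun o => !pvTruthy (pvGet? o "is_obstacle") && !(pvGet? o "class" == some "person")).length,
       PySem.Set.ofList (((xs.filter fun o => !pvTruthy (pvGet? o "is_obstacle") && !(pvGet? o "class" == some "person")).take 3).map (fun o => (pvGet? o "class").getD "object"))) := by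
  induction xs using List.reverseRecOn with
  | nil => simp [PySem.Set.ofList]
  | append_singleton ys x ih =>
      rw [List.foldl_append, ih]
      by_cases hp : (pvGet? x "class" == some "person") = true <;>
      by_cases ho : pvTruthy (pvGet? x "is_obstacle") = true <;>
        simp [pvStepB, hp, ho, List.filter_append]
      · -- the "other" case: x is neither person nor obstacle
        by_cases h3 : (ys.filter fun o => !pvTruthy (pvGet? o "is_obstacle") && !(pvGet? o "class" == some "person")).length < 3
        · have htake : List.take (3 - (ys.filter fun o => !pvTruthy (pvGet? o "is_obstacle") && !(pvGet? o "class" == some "person")).length) [(pvGet? x "class").getD "object"] = [(pvGet? x "class").getD "object"] := by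
            apply List.take_of_length_le; simp; omega
          simp [h3, List.take_append, htake, PySem.Set.ofList_append_singleton]
        · have h0 : 3 - (ys.filter fun o => !pvTruthy (pvGet? o "is_obstacle") && !(pvGet? o "class" == some "person")).length = 0 := by omega
          simp [h3, List.take_append, h0]

-- dict .get on an association list is library lookup (first match)
theorem pvGet?_eq_lookup {α : Type} (d : List (String × α)) (k : String) :
    pvGet? d k = List.lookup k d := by
  induction d with
  | nil => rfl
  | cons h t ih =>
      obtain ⟨a, v⟩ := h
      by_cases hak : a = k
      · simp [pvGet?, hak, List.lookup]
      · have hk : (k == a) = false := by simp [Ne.symm hak]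
        simp [pvGet?, hak, List.lookup, hk, ih]

-- Pre_'s "other" predicate is the ports' "other" predicate
theorem pvPred_eq :
    (fun (o : List (String × String)) => ((pvGet? o "is_obstacle").getD "" == "") && !(pvGet? o "class" == some "person"))
      = (fun o => !pvTruthy (pvGet? o "is_obstacle") && !(pvGet? o "class" == some "person")) := by
  funext o
  cases pvGet? o "is_obstacle" <;> simp [pvTruthy]


-- ===== VERDICT (by name: the statement is the Claim_ definition above) =====
theorem format_scene_description_spec : Claim_equal_format_scene_description := by
  intro scene _ hpre
  unfold Spec_format_scene_description format_scene_description format_scene_description_alt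
  by_cases h : (pvGet? scene "objects").getD [] = []
  · simp [h]
  · simp only [if_neg h, pvFoldB]
    rw [show ((3:Int)) = ((3:Nat):Int) by norm_num, PySem.List.slice_to_natCast]
    unfold Pre_format_scene_description at hpre
    simp only [← pvGet?_eq_lookup] at hpre
    rw [pvPred_eq] at hpre
    simp only [PySem.List.dedup_eq_ofList] at hpre
    set P := ((pvGet? scene "objects").getD []).filter (fun o => pvGet? o "class" == some "person") with hP
    set O := ((pvGet? scene "objects").getD []).filter (fun o => pvTruthy (pvGet? o "is_obstacle")) with hO
    set R := ((pvGet? scene "objects").getD []).filter (fun o => !pvTruthy (pvGet? o "is_obstacle") && !(pvGet? o "class" == some "person")) with hR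
    set N := PySem.Set.ofList ((R.take 3).map (fun o => (pvGet? o "class").getD "object")) with hN
    clear_value P O R N
    clear hP hO hR hN h
    -- Pre_ bounds the distinct names: at most one, so the sort is the identity
    have hs : PySem.List.sorted N (fun x => x) false = N := by
      rcases N with _ | ⟨a, t⟩
      · rfl
      · rcases t with _ | ⟨b, u⟩
        · apply PySem.List.sorted_eq_self_of_pairwise
          exact List.Pairwise.cons (by simp) List.Pairwise.nil
        · simp at hpre
    rw [hs]
    simp only [← List.length_eq_zero_iff]
    generalize P.length = p
    generalize O.length = q
    generalize R.length = r
    split_ifs <;> simp only [List.nil_append] <;> omega
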